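-- pv_equiv track=rewrite | github.com/Jeongjjuna/programmers-BOJ | 프로그래머스/1/64061. 크레인 인형뽑기 게임/크레인 인형뽑기 게임.py | solution
-- ===== SOURCE A (Python) =====
-- def make_stack_board(board, r, c):
--     stack_board = []
--
--     for i in range(c):
--         stack = []
--         for j in range(r - 1, -1, -1):
--             if board[j][i] != 0:
--                 stack.append(board[j][i])
--         stack_board.append(stack)
--
--     return stack_board
--
-- def bomb(basket, selected):
--     if len(basket) == 0:
--         basket.append(selected)
--         return 0
--
--     if basket[-1] == selected:
--         basket.pop()
--         return 2
--     else:
--         basket.append(selected)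
--         return 0
--
-- def solution(board, moves):
--
--     # 변수 입력 및 선언
--     answer = 0
--     r, c = len(board), len(board[0])
--
--
--     # 전부 스택형태로 바꾸기
--     '''
--     [[3,4] 스택..
--     [5,2,2] 스택..
--     [1,4,5,1]
--     [3,4]
--     [1,2,1,3]]
--     '''
--     board = make_stack_board(board, r, c)
--
--
--     basket = []
--     for move in moves:
--         move_idx = move - 1
--
--         # 뽑을 게 없으면 패스
--         if len(board[move_idx]) == 0:
--             continue
--
--         # 뽑아주기
--         selected = board[move_idx].pop()
--
--         # 뽑아준걸 바구니에 넣기(터진 개수를 반환)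
--         answer += bomb(basket, selected)
--
--
--     return answer
-- ===== SOURCE B (Python) =====
-- def solution(board, moves):
--     answer = 0
--     r = len(board)
--     cursors = [0] * len(board[0])
--     basket = []
--     for m in moves:
--         col = m - 1
--         cur = cursors[col]
--         while cur < r and board[cur][col] == 0:
--             cur += 1
--         if cur < r:
--             selected = board[cur][col]
--             cursors[col] = cur + 1
--             if basket and basket[-1] == selected:
--                 basket.pop()
--                 answer += 2
--             else:
--                 basket.append(selected)
--     return answer
-- ===== Notes on version B (the rewrite author's own statement) =====
-- stated objective: alternative
-- what changed: B drops A's pre-built per-column filtered stack lists and instead keeps one cursor per column over the untouched board, lazily scanning downward past zeros at pick time and managing the basket inline instead of via a helper.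
-- outside the precondition, e.g. on solution([[0, 3], [1, 2, 3]], [2, 0]): A returns 0, B returns 2; on solution([[1, 2], [3]], [1]): A raises IndexError, B returns 0; on solution([], []): A raises IndexError, B raises IndexError
import Mathlib
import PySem

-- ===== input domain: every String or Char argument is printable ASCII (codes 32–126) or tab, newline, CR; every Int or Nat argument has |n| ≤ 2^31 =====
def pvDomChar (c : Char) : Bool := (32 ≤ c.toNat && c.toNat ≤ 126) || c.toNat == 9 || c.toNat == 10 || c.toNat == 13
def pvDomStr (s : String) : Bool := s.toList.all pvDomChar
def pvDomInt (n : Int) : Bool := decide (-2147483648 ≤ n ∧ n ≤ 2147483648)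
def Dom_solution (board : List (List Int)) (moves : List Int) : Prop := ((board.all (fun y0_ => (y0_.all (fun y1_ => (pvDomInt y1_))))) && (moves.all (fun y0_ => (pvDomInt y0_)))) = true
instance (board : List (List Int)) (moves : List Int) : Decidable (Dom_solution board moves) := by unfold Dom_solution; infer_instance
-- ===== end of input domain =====

-- B keeps the input board untouched and replaces A's pre-built per-column filtered stacks by one lazy
-- cursor per column that scans the original board downward, skipping zeros (alternative decomposition).
-- Neither implementation mutates the caller's arguments (A rebinds `board` locally).

-- ===== PORT A =====
def make_stack_board (board : List (List Int)) (r c : Int) : List (List Int) :=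
  (PySem.List.pyRange 0 c 1).foldl (fun stack_board i =>
    stack_board ++
      [(PySem.List.pyRange (r - 1) (-1) (-1)).foldl (fun stack j =>
        if PySem.List.pyGetD (PySem.List.pyGetD board j []) i 0 != 0 then
          stack ++ [PySem.List.pyGetD (PySem.List.pyGetD board j []) i 0]
        else stack) []]) []

def bomb (basket : List Int) (selected : Int) : List Int × Int :=
  if basket.length = 0 then (basket ++ [selected], 0)
  else if PySem.List.pyGetD basket (-1) 0 = selected then (basket.dropLast, 2)
  else (basket ++ [selected], 0)

def solution (board : List (List Int)) (moves : List Int) : Int :=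
  let r : Int := PySem.List.len board
  let c : Int := PySem.List.len (PySem.List.pyGetD board 0 [])
  let sb0 := make_stack_board board r c
  (moves.foldl (fun (st : List (List Int) × List Int × Int) mv =>
      let move_idx := mv - 1
      let col := PySem.List.pyGetD st.1 move_idx []
      if col.length = 0 then st
      else
        let selected := PySem.List.pyGetD col (-1) 0
        let b := bomb st.2.1 selected
        (PySem.List.pySetD st.1 move_idx col.dropLast, b.1, st.2.2 + b.2))
    (sb0, ([], 0))).2.2

-- ===== PORT B =====
def pvScan (board : List (List Int)) (col : Int) (r cur : Int) : Int :=
  if h : cur < r then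
    if PySem.List.pyGetD (PySem.List.pyGetD board cur []) col 0 = 0 then
      pvScan board col r (cur + 1)
    else cur
  else cur
termination_by (r - cur).toNat
decreasing_by omega

def solution_alt (board : List (List Int)) (moves : List Int) : Int :=
  (moves.foldl (fun (st : List Int × List Int × Int) m =>
      let col := m - 1
      let cur := pvScan board col (PySem.List.len board) (PySem.List.pyGetD st.1 col 0)
      if cur < PySem.List.len board then
        let selected := PySem.List.pyGetD (PySem.List.pyGetD board cur []) col 0
        let cursors := PySem.List.pySetD st.1 col (cur + 1)
        if st.2.1 ≠ [] ∧ PySem.List.pyGetD st.2.1 (-1) 0 = selected then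
          (cursors, st.2.1.dropLast, st.2.2 + 2)
        else (cursors, st.2.1 ++ [selected], st.2.2)
      else st)
    (List.replicate (PySem.List.pyGetD board 0 []).length 0, ([], 0))).2.2

-- ===== PRECONDITION & SPEC =====
-- Pre_ is the puzzle's natural domain: a nonempty board whose rows are at least as long as row 0
-- (A raises IndexError on shorter rows) and moves that address an existing column, with the
-- negative/zero moves (Python wraparound) additionally requiring an exactly rectangular board —
-- on a ragged board a wraparound move makes A and B read different cells, an accident of
-- indexing that no caller of this puzzle solution relies on; A raises on everything else excluded.
def Pre_solution (board : List (List Int)) (moves : List Int) : Prop :=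
  board ≠ [] ∧
  (∀ row ∈ board, (board.headD []).length ≤ row.length) ∧
  (∀ m ∈ moves,
    (1 ≤ m ∧ m ≤ ((board.headD []).length : Int)) ∨
    ((1 - ((board.headD []).length : Int) ≤ m ∧ m ≤ 0) ∧
      ∀ row ∈ board, row.length = (board.headD []).length))
instance (board : List (List Int)) (moves : List Int) : Decidable (Pre_solution board moves) := by
  unfold Pre_solution; infer_instance

def pvWitness_solution : List (List Int) × List Int := ([[0, 3], [1, 2], [4, 3]], [1, 2, 2, 1])

def Spec_solution (board : List (List Int)) (moves : List Int) (out : Int) : Prop := out = solution_alt board moves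
instance (board : List (List Int)) (moves : List Int) (out : Int) : Decidable (Spec_solution board moves out) := by unfold Spec_solution; infer_instance

-- ===== CLAIM (what is proved, stated in full; the proofs are below) =====
def Claim_equal_solution : Prop := ∀ (board : List (List Int)) (moves : List Int), Dom_solution board moves → Pre_solution board moves → Spec_solution board moves (solution board moves)

-- ===== LEMMAS AND PROOFS =====

-- Python's wrapped index normalised to a Nat position.
def pyNorm (n : Nat) (i : Int) : Nat := (if i < 0 then i + n else i).toNat

theorem pySetD_norm {α : Type} (xs : List α) (i : Int) (v : α) (h1 : -(xs.length : Int) ≤ i)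
    (h2 : i < xs.length) : PySem.List.pySetD xs i v = xs.set (pyNorm xs.length i) v := by
  simp only [PySem.List.pySetD, PySem.List.pySet?, PySem.List.pyIdx?, pyNorm]
  by_cases h : 0 ≤ i
  · rw [if_pos h, if_pos h2, if_neg (by omega : ¬ i < 0)]; simp
  · rw [if_neg h, if_pos h1, if_pos (by omega : i < 0)]
    have he : xs.length - (-i).toNat = (i + ↑xs.length).toNat := by omega
    simp [he]

theorem pyGetD_norm {α : Type} (xs : List α) (i : Int) (d : α) (h1 : -(xs.length : Int) ≤ i)
    (h2 : i < xs.length) : PySem.List.pyGetD xs i d = xs.getD (pyNorm xs.length i) d := by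
  simp only [PySem.List.pyGetD, PySem.List.pyGet?, PySem.List.pyIdx?, pyNorm]
  by_cases h : 0 ≤ i
  · rw [if_pos h, if_pos h2, if_neg (by omega : ¬ i < 0)]; simp [List.getD_eq_getElem?_getD]
  · rw [if_neg h, if_pos h1, if_pos (by omega : i < 0)]
    have he : xs.length - (-i).toNat = (i + ↑xs.length).toNat := by omega
    simp [he, List.getD_eq_getElem?_getD]

theorem pyNorm_lt (n : Nat) (i : Int) (h1 : -(n : Int) ≤ i) (h2 : i < n) : pyNorm n i < n := by
  simp only [pyNorm]; split_ifs <;> omega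

-- the value A's column stacks and B's scans both read at column i of a row
def colProj (i : Nat) (row : List Int) : Int := PySem.List.pyGetD row (i : Int) 0

-- the still-available (nonzero) dolls of column i from row cu downward, top first
def colFrom (board : List (List Int)) (i cu : Nat) : List Int :=
  ((board.drop cu).map (colProj i)).filter (· != 0)

theorem colFrom_of_ge (board : List (List Int)) (i cu : Nat) (h : board.length ≤ cu) :
    colFrom board i cu = [] := by
  simp [colFrom, List.drop_eq_nil_of_le h]

theorem colFrom_of_lt (board : List (List Int)) (i cu : Nat) (h : cu < board.length) :
    colFrom board i cu =
      if colProj i (board.getD cu []) != 0 then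
        colProj i (board.getD cu []) :: colFrom board i (cu + 1)
      else colFrom board i (cu + 1) := by
  have hd : board.drop cu = board[cu] :: board.drop (cu + 1) := List.drop_eq_getElem_cons h
  have hg : board.getD cu [] = board[cu] := List.getD_eq_getElem board [] h
  rw [colFrom, hd, hg]
  simp only [List.map_cons, List.filter_cons]
  split_ifs <;> simp_all [colFrom]

-- A's pre-built stack board, closed form
theorem make_stack_board_eq_map (board : List (List Int)) (r c : Int) :
    make_stack_board board r c = (PySem.List.pyRange 0 c 1).map (fun i =>
      ((((PySem.List.pyRange 0 r 1).map (fun j => PySem.List.pyGetD board j [])).map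
        (fun row => PySem.List.pyGetD row i 0)).filter (· != 0)).reverse) := by
  rw [make_stack_board]
  rw [show (fun (stack_board : List (List Int)) (i : Int) => stack_board ++
      [(PySem.List.pyRange (r - 1) (-1) (-1)).foldl (fun stack j =>
        if PySem.List.pyGetD (PySem.List.pyGetD board j []) i 0 != 0 then
          stack ++ [PySem.List.pyGetD (PySem.List.pyGetD board j []) i 0]
        else stack) []]) = (fun stack_board i => stack_board ++ [(fun i =>
      ((((PySem.List.pyRange 0 r 1).map (fun j => PySem.List.pyGetD board j [])).map
        (fun row => PySem.List.pyGetD row i 0)).filter (· != 0)).reverse) i]) from ?_]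
  · rw [PySem.List.foldl_append_singleton_eq_map]; simp
  · funext sb i
    congr 1
    rw [show PySem.List.pyRange (r-1) (-1) (-1) = (PySem.List.pyRange 0 r 1).reverse by
      have := PySem.List.pyRange_neg_one_eq_reverse (r-1) (-1); norm_num at this ⊢; exact this]
    rw [PySem.List.foldl_append_if (fun j => PySem.List.pyGetD (PySem.List.pyGetD board j []) i 0 != 0)
      (fun j => PySem.List.pyGetD (PySem.List.pyGetD board j []) i 0)]
    simp only [List.filter_reverse, List.map_reverse, List.nil_append]
    congr 1
    simp only [List.filter_map, List.map_map, Function.comp_def]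

theorem make_stack_board_eq (board : List (List Int)) (c : Int) :
    make_stack_board board (PySem.List.len board) c =
      (PySem.List.pyRange 0 c 1).map (fun i =>
        ((board.map (fun row => PySem.List.pyGetD row i 0)).filter (· != 0)).reverse) := by
  rw [make_stack_board_eq_map]
  congr 1
  funext i
  congr 2
  rw [PySem.List.map_pyGetD_pyRange_zero]

theorem make_stack_board_length (board : List (List Int)) (c : Nat) :
    (make_stack_board board (PySem.List.len board) (c : Int)).length = c := by
  rw [make_stack_board_eq]
  simp [PySem.List.length_pyRange_one]

theorem make_stack_board_getD (board : List (List Int)) (c : Nat) (i : Nat) (hi : i < c) :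
    (make_stack_board board (PySem.List.len board) (c : Int)).getD i [] =
      (colFrom board i 0).reverse := by
  rw [make_stack_board_eq]
  rw [List.getD_eq_getElem?_getD]
  rw [PySem.List.getElem?_map_pyRange_zero _ c i hi]
  have hc : colProj i = fun row : List Int => row[i]?.getD 0 := by
    funext row; simp [colProj, List.getD_eq_getElem?_getD]
  simp [colFrom, hc]

-- characterisation of B's scan: it finds exactly the head of colFrom (or r)
theorem pvScan_spec (board : List (List Int)) (col : Int) (i : Nat)
    (hread : ∀ cu : Nat, cu < board.length →
      PySem.List.pyGetD (board.getD cu []) col 0 = colProj i (board.getD cu []))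
    (n : Nat) : ∀ cu : Nat, board.length - cu ≤ n → cu ≤ board.length →
    (colFrom board i cu = [] → pvScan board col (board.length : Int) (cu : Int) = (board.length : Int)) ∧
    (∀ v rest, colFrom board i cu = v :: rest →
      ∃ j : Nat, pvScan board col (board.length : Int) (cu : Int) = (j : Int) ∧
        j < board.length ∧ colProj i (board.getD j []) = v ∧ colFrom board i (j + 1) = rest) := by
  induction n with
  | zero =>
    intro cu hn hcu
    have he : cu = board.length := by omega
    constructor
    · intro _; rw [pvScan]; simp [he]
    · intro v rest hvr; rw [colFrom_of_ge board i cu (by omega)] at hvr; exact absurd hvr (by simp)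
  | succ n ih =>
    intro cu hn hcu
    rcases Nat.eq_or_lt_of_le hcu with he | hlt
    · constructor
      · intro _; rw [pvScan]; simp [he]
      · intro v rest hvr; rw [colFrom_of_ge board i cu (by omega)] at hvr; exact absurd hvr (by simp)
    · have hb : PySem.List.pyGetD board (cu : Int) [] = board.getD cu [] := by
        rw [PySem.List.pyGetD_eq_getElem board [] (by omega) (by exact_mod_cast hlt)]
        simp [List.getD_eq_getElem?_getD, List.getElem?_eq_getElem hlt]
      have hrd := hread cu hlt
      rw [colFrom_of_lt board i cu hlt]
      by_cases hz : colProj i (board.getD cu []) = 0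
      · -- zero cell: the scan steps over it
        have hstep : pvScan board col (board.length : Int) (cu : Int) =
            pvScan board col (board.length : Int) ((cu + 1 : Nat) : Int) := by
          rw [pvScan]
          rw [dif_pos (by exact_mod_cast hlt)]
          rw [hb, hrd, if_pos hz]
          norm_num
        rw [if_neg (by simp [-List.getD_eq_getElem?_getD, hz]), hstep]
        exact ih (cu + 1) (by omega) (by omega)
      · -- nonzero cell: the scan stops here
        have hstop : pvScan board col (board.length : Int) (cu : Int) = (cu : Int) := by
          rw [pvScan]
          rw [dif_pos (by exact_mod_cast hlt)]
          rw [hb, hrd, if_neg hz]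
        rw [if_pos (by simp [-List.getD_eq_getElem?_getD, hz])]
        constructor
        · intro hnil; exact absurd hnil (by simp)
        · intro v rest hvr
          injection hvr with h1 h2
          exact ⟨cu, hstop, hlt, h1, h2⟩

theorem getD_set_self {α : Type} (xs : List α) (i : Nat) (h : i < xs.length) (v d : α) :
    (xs.set i v).getD i d = v := by
  simp [List.getD_eq_getElem?_getD, h]

theorem getD_set_ne {α : Type} (xs : List α) (i i' : Nat) (h : i ≠ i') (v : α) (d : α) :
    (xs.set i v).getD i' d = xs.getD i' d := by
  simp [List.getD_eq_getElem?_getD, h]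

-- the loop bodies of the two ports, named for the simulation argument
def pvStepA (st : List (List Int) × List Int × Int) (mv : Int) :
    List (List Int) × List Int × Int :=
  let move_idx := mv - 1
  let col := PySem.List.pyGetD st.1 move_idx []
  if col.length = 0 then st
  else
    let selected := PySem.List.pyGetD col (-1) 0
    let b := bomb st.2.1 selected
    (PySem.List.pySetD st.1 move_idx col.dropLast, b.1, st.2.2 + b.2)

def pvStepB (board : List (List Int)) (st : List Int × List Int × Int) (m : Int) :
    List Int × List Int × Int :=
  let col := m - 1
  let cur := pvScan board col (PySem.List.len board) (PySem.List.pyGetD st.1 col 0)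
  if cur < PySem.List.len board then
    let selected := PySem.List.pyGetD (PySem.List.pyGetD board cur []) col 0
    let cursors := PySem.List.pySetD st.1 col (cur + 1)
    if st.2.1 ≠ [] ∧ PySem.List.pyGetD st.2.1 (-1) 0 = selected then
      (cursors, st.2.1.dropLast, st.2.2 + 2)
    else (cursors, st.2.1 ++ [selected], st.2.2)
  else st

-- the simulation invariant between A's state and B's state
def pvInv (board : List (List Int)) (c : Nat) (a : List (List Int) × List Int × Int)
    (b : List Int × List Int × Int) : Prop :=
  a.2 = b.2 ∧ a.1.length = c ∧ b.1.length = c ∧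
  ∀ i : Nat, i < c → ∃ cu : Nat, cu ≤ board.length ∧ b.1.getD i 0 = (cu : Int) ∧
    a.1.getD i [] = (colFrom board i cu).reverse

theorem step_inv (board : List (List Int)) (c : Nat) (m : Int)
    (hm : (1 ≤ m ∧ m ≤ (c : Int)) ∨
      ((1 - (c : Int) ≤ m ∧ m ≤ 0) ∧ ∀ row ∈ board, row.length = c))
    (a : List (List Int) × List Int × Int) (b : List Int × List Int × Int)
    (hinv : pvInv board c a b) : pvInv board c (pvStepA a m) (pvStepB board b m) := by
  obtain ⟨hbask, hla, hlb, hcols⟩ := hinv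
  have hcol1 : -(c : Int) ≤ m - 1 := by rcases hm with ⟨h1, h2⟩ | ⟨⟨h1, h2⟩, _⟩ <;> omega
  have hcol2 : m - 1 < (c : Int) := by rcases hm with ⟨h1, h2⟩ | ⟨⟨h1, h2⟩, _⟩ <;> omega
  have hi : pyNorm c (m - 1) < c := pyNorm_lt c (m - 1) hcol1 hcol2
  set i := pyNorm c (m - 1) with hidef
  have hread : ∀ cu : Nat, cu < board.length →
      PySem.List.pyGetD (board.getD cu []) (m - 1) 0 = colProj i (board.getD cu []) := by
    intro cu hcu
    have hmem : board.getD cu [] ∈ board := by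
      rw [List.getD_eq_getElem board [] hcu]; exact List.getElem_mem _
    rcases hm with ⟨h1, h2⟩ | ⟨⟨h1, h2⟩, hrect⟩
    · have hci : ((i : Nat) : Int) = m - 1 := by simp only [hidef, pyNorm]; split_ifs <;> omega
      rw [colProj, hci]
    · have hlen : (board.getD cu []).length = c := hrect _ hmem
      rw [pyGetD_norm _ (m - 1) 0 (by rw [hlen]; omega) (by rw [hlen]; exact_mod_cast hcol2)]
      rw [colProj, pyGetD_norm _ ((i : Nat) : Int) 0 (by omega)
        (by rw [hlen]; exact_mod_cast hi)]
      rw [hlen]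
      congr 1
  obtain ⟨cu, hcu, hbcur, hacol⟩ := hcols i hi
  have hA : PySem.List.pyGetD a.1 (m - 1) [] = (colFrom board i cu).reverse := by
    rw [pyGetD_norm a.1 (m - 1) [] (by rw [hla]; exact hcol1) (by rw [hla]; exact hcol2), hla]
    exact hacol
  have hB : PySem.List.pyGetD b.1 (m - 1) 0 = (cu : Int) := by
    rw [pyGetD_norm b.1 (m - 1) 0 (by rw [hlb]; exact hcol1) (by rw [hlb]; exact hcol2), hlb]
    exact hbcur
  have hsetA : PySem.List.pySetD a.1 (m - 1) = fun v => a.1.set i v := by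
    funext v
    rw [pySetD_norm a.1 (m - 1) v (by rw [hla]; exact hcol1) (by rw [hla]; exact hcol2), hla]
  have hsetB : PySem.List.pySetD b.1 (m - 1) = fun v => b.1.set i v := by
    funext v
    rw [pySetD_norm b.1 (m - 1) v (by rw [hlb]; exact hcol1) (by rw [hlb]; exact hcol2), hlb]
  simp only [pvStepA, pvStepB, PySem.List.len, hA, hB, hsetA, hsetB]
  cases hcf : colFrom board i cu with
  | nil =>
    have hscan := (pvScan_spec board (m - 1) i hread board.length cu (by omega) hcu).1 hcf
    rw [hscan]
    simp only [List.reverse_nil, List.length_nil, lt_irrefl, if_true, if_false]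
    exact ⟨hbask, hla, hlb, hcols⟩
  | cons v rest =>
    obtain ⟨j, hj, hjlt, hjv, hjrest⟩ :=
      (pvScan_spec board (m - 1) i hread board.length cu (by omega) hcu).2 v rest hcf
    rw [hj]
    have hjb : PySem.List.pyGetD board ((j : Nat) : Int) [] = board.getD j [] := by
      rw [PySem.List.pyGetD_eq_getElem board [] (by omega) (by exact_mod_cast hjlt)]
      simp [List.getD_eq_getElem?_getD, List.getElem?_eq_getElem hjlt]
    have hsel : PySem.List.pyGetD (PySem.List.pyGetD board ((j : Nat) : Int) []) (m - 1) 0 = v := by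
      rw [hjb, hread j hjlt, hjv]
    have hselA : PySem.List.pyGetD (v :: rest).reverse (-1) 0 = v := by
      rw [List.reverse_cons]; exact PySem.List.pyGetD_neg_one_append_singleton rest.reverse v 0
    have hdrop : (v :: rest).reverse.dropLast = rest.reverse := by
      rw [List.reverse_cons]; exact List.dropLast_concat
    have hlen0 : ¬ ((v :: rest).reverse.length = 0) := by simp
    rw [if_neg hlen0, if_pos (by exact_mod_cast hjlt), hsel, hselA, hdrop]
    have hba : a.2.1 = b.2.1 := congrArg Prod.fst hbask
    have hans : a.2.2 = b.2.2 := congrArg Prod.snd hbask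
    have hnewcols : ∀ i' : Nat, i' < c → ∃ cu' : Nat, cu' ≤ board.length ∧
        (b.1.set i ((j : Nat) + 1)).getD i' 0 = (cu' : Int) ∧
        (a.1.set i rest.reverse).getD i' [] = (colFrom board i' cu').reverse := by
      intro i' hi'
      by_cases hii : i' = i
      · subst hii
        refine ⟨j + 1, by omega, ?_, ?_⟩
        · rw [getD_set_self b.1 i (hlb ▸ hi') _ _]; push_cast; ring
        · rw [getD_set_self a.1 i (hla ▸ hi') _ _, hjrest]
      · obtain ⟨cu', h1, h2, h3⟩ := hcols i' hi'
        exact ⟨cu', h1, by rwa [getD_set_ne b.1 i i' (fun h => hii h.symm)],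
          by rwa [getD_set_ne a.1 i i' (fun h => hii h.symm)]⟩
    by_cases hb0 : b.2.1 = []
    · rw [bomb, if_pos (by rw [hba, hb0]; rfl), if_neg (by simp [hb0])]
      exact ⟨by rw [Prod.ext_iff]; exact ⟨by rw [hba], by rw [hans]; ring⟩,
        by simp [hla], by simp [hlb], hnewcols⟩
    · have hba0 : ¬ (a.2.1.length = 0) := by rw [hba]; simpa using hb0
      by_cases hbv : PySem.List.pyGetD b.2.1 (-1) 0 = v
      · rw [bomb, if_neg hba0, if_pos (by rw [hba]; exact hbv), if_pos ⟨hb0, hbv⟩]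
        exact ⟨by rw [Prod.ext_iff]; exact ⟨by rw [hba], by rw [hans]⟩,
          by simp [hla], by simp [hlb], hnewcols⟩
      · rw [bomb, if_neg hba0, if_neg (by rw [hba]; exact hbv), if_neg (by simp [hbv])]
        exact ⟨by rw [Prod.ext_iff]; exact ⟨by rw [hba], by rw [hans]; ring⟩,
          by simp [hla], by simp [hlb], hnewcols⟩

theorem fold_inv (board : List (List Int)) (c : Nat) (moves : List Int)
    (hm : ∀ m ∈ moves, (1 ≤ m ∧ m ≤ (c : Int)) ∨
      ((1 - (c : Int) ≤ m ∧ m ≤ 0) ∧ ∀ row ∈ board, row.length = c)) :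
    ∀ a b, pvInv board c a b →
      pvInv board c (moves.foldl pvStepA a) (moves.foldl (pvStepB board) b) := by
  induction moves with
  | nil => intro a b h; exact h
  | cons m t ih =>
    intro a b h
    exact ih (fun x hx => hm x (List.mem_cons_of_mem m hx)) _ _
      (step_inv board c m (hm m (List.mem_cons_self)) a b h)

-- ===== VERDICT (by name: the statement is the Claim_ definition above) =====
theorem solution_spec : Claim_equal_solution := by
  intro board moves _ hpre
  obtain ⟨hne, hrows, hmoves⟩ := hpre
  unfold Spec_solution solution solution_alt
  have hhead : PySem.List.pyGetD board 0 [] = board.headD [] := by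
    cases board with
    | nil => simp at hne
    | cons x l => simp [PySem.List.pyGetD, PySem.List.pyGet?, PySem.List.pyIdx?]
  set c := (board.headD []).length with hc
  have hstepa : (fun (st : List (List Int) × List Int × Int) (mv : Int) =>
      let move_idx := mv - 1
      let col := PySem.List.pyGetD st.1 move_idx []
      if col.length = 0 then st
      else
        let selected := PySem.List.pyGetD col (-1) 0
        let b := bomb st.2.1 selected
        (PySem.List.pySetD st.1 move_idx col.dropLast, b.1, st.2.2 + b.2)) = pvStepA := rfl
  have hstepb : (fun (st : List Int × List Int × Int) (m : Int) =>
      let col := m - 1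
      let cur := pvScan board col (PySem.List.len board) (PySem.List.pyGetD st.1 col 0)
      if cur < PySem.List.len board then
        let selected := PySem.List.pyGetD (PySem.List.pyGetD board cur []) col 0
        let cursors := PySem.List.pySetD st.1 col (cur + 1)
        if st.2.1 ≠ [] ∧ PySem.List.pyGetD st.2.1 (-1) 0 = selected then
          (cursors, st.2.1.dropLast, st.2.2 + 2)
        else (cursors, st.2.1 ++ [selected], st.2.2)
      else st) = pvStepB board := rfl
  rw [hhead, hstepa, hstepb]
  rw [show PySem.List.len (board.headD []) = ((c : Nat) : Int) from by
    cases board with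
    | nil => exact absurd rfl hne
    | cons x l => simp [PySem.List.len, hc]]
  have hinit : pvInv board c
      (make_stack_board board (PySem.List.len board) ((c : Nat) : Int), ([], 0))
      (List.replicate c (0 : Int), ([], 0)) := by
    refine ⟨rfl, make_stack_board_length board c, by simp, ?_⟩
    intro i hi
    exact ⟨0, Nat.zero_le _,
      by simp [List.getD_eq_getElem?_getD, hi],
      make_stack_board_getD board c i hi⟩
  exact congrArg Prod.snd (fold_inv board c moves hmoves _ _ hinit).1
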